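-- pv_equiv track=rewrite | github.com/HassanHotait/perception-validation-verification | DepthEvaluatorClass.py | match_pred_2_gt_by_obj_center
-- ===== SOURCE A (Python) =====
-- def match_pred_2_gt_by_obj_center(pred_obj_center,gt_objs_center):
--
--     error_list=[]
--     for gt_obj_center in gt_objs_center:
--         x_error=(pred_obj_center[0]-gt_obj_center[0])**2
--         y_error=(pred_obj_center[1]-gt_obj_center[1])**2
--         error=x_error+y_error
--         error_list.append(error)
--
--     gt_object_match_index=error_list.index(min(error_list))
--
--     return gt_object_match_index
-- ===== SOURCE B (Python) =====
-- def match_pred_2_gt_by_obj_center(pred_obj_center, gt_objs_center):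
--     # Divide-and-conquer (tournament) argmin over index ranges instead of A's
--     # build-list / min / .index triple pass. On a tie the LEFT half wins, so the
--     # first minimal index is returned; an empty list raises ValueError like A.
--     if not gt_objs_center:
--         raise ValueError("empty ground-truth list")
--     px, py = pred_obj_center[0], pred_obj_center[1]
--
--     def err(i):
--         gx, gy = gt_objs_center[i]
--         return (px - gx) ** 2 + (py - gy) ** 2
--
--     def best(lo, hi):
--         # first-minimal (index, error) over [lo, hi), hi - lo >= 1
--         if hi - lo == 1:
--             return (lo, err(lo))
--         mid = (lo + hi) // 2
--         left = best(lo, mid)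
--         right = best(mid, hi)
--         return left if left[1] <= right[1] else right
--
--     return best(0, len(gt_objs_center))[0]
-- ===== Notes on version B (the rewrite author's own statement) =====
-- stated objective: alternative
-- what changed: A builds an explicit error list and rescans it with min() and then list.index(); B is a recursive divide-and-conquer tournament over index ranges, combining half-results with a left-biased comparison, with no intermediate list and no rescan.
import Mathlib
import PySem

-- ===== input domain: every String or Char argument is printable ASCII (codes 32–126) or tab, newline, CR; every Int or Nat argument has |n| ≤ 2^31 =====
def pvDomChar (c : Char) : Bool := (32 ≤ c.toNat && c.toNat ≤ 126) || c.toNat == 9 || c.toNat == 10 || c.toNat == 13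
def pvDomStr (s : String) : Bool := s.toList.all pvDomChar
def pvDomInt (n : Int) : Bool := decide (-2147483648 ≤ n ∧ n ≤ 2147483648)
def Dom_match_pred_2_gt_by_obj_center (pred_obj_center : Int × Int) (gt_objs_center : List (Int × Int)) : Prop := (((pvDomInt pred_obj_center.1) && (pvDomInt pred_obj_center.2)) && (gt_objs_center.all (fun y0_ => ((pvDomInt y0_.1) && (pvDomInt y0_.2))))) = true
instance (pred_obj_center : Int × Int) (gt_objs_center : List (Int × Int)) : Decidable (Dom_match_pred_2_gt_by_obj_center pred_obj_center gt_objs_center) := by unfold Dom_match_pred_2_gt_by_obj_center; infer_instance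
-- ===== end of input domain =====

-- B replaces A's build-error-list / min / list.index triple pass by a recursive
-- divide-and-conquer tournament over index ranges (objective: alternative; same
-- O(n) comparison count, no auxiliary list, left-biased ties give the first index).

-- ===== PORT A =====
-- A: build error_list, take min(error_list), then error_list.index(that minimum).
def match_pred_2_gt_by_obj_center (pred_obj_center : Int × Int) (gt_objs_center : List (Int × Int)) : Int :=
  let error_list := gt_objs_center.foldl
    (fun acc g =>
      let x_error := (pred_obj_center.1 - g.1) ^ 2
      let y_error := (pred_obj_center.2 - g.2) ^ 2
      acc ++ [x_error + y_error]) []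
  match PySem.List.min? error_list (fun x => x) with
  | none => 0   -- unreachable: Python's min([]) raises ValueError, excluded by Pre_
  | some m => ((PySem.List.index? error_list m).getD 0 : Int)

-- ===== PORT B =====
-- err(i): squared distance of the prediction to gt[i] (index always in range in B's calls).
def pvErr (p : Int × Int) (gt : List (Int × Int)) (i : Int) : Int :=
  let g := PySem.List.pyGetD gt i (0, 0)
  (p.1 - g.1) ^ 2 + (p.2 - g.2) ^ 2

-- best(lo, hi): first-minimal (index, error) over [lo, hi) by divide and conquer.
-- Python tests 'hi - lo == 1'; the '≤ 1' here only makes the recursion total on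
-- intervals B never calls (hi - lo ≥ 1 always holds in B), same values there.
def pvBest (p : Int × Int) (gt : List (Int × Int)) (lo hi : Int) : Int × Int :=
  if _hguard : hi - lo ≤ 1 then (lo, pvErr p gt lo)
  else
    let mid := PySem.Int.floordiv (lo + hi) 2
    let left := pvBest p gt lo mid
    let right := pvBest p gt mid hi
    if left.2 ≤ right.2 then left else right
termination_by (hi - lo).toNat
decreasing_by
  · have hlo : lo + 1 ≤ PySem.Int.floordiv (lo + hi) 2 :=
      (PySem.Int.le_floordiv_iff_mul_le (by omega)).mpr (by omega)
    have hhi : PySem.Int.floordiv (lo + hi) 2 < hi :=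
      (PySem.Int.floordiv_lt_iff_lt_mul (by omega)).mpr (by omega)
    omega
  · have hhi : PySem.Int.floordiv (lo + hi) 2 < hi :=
      (PySem.Int.floordiv_lt_iff_lt_mul (by omega)).mpr (by omega)
    have hlo : lo + 1 ≤ PySem.Int.floordiv (lo + hi) 2 :=
      (PySem.Int.le_floordiv_iff_mul_le (by omega)).mpr (by omega)
    omega

-- B: raise ValueError on an empty list (excluded by Pre_; 0 is an unreachable
-- placeholder), else the index component of best(0, len(gt_objs_center)).
def match_pred_2_gt_by_obj_center_alt (pred_obj_center : Int × Int) (gt_objs_center : List (Int × Int)) : Int :=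
  if gt_objs_center.isEmpty then 0
  else (pvBest pred_obj_center gt_objs_center 0 gt_objs_center.length).1

-- ===== PRECONDITION & SPEC =====
-- Pre_ excludes only the empty ground-truth list, on which both A's and B's Python raise ValueError.
def Pre_match_pred_2_gt_by_obj_center (pred_obj_center : Int × Int) (gt_objs_center : List (Int × Int)) : Prop :=
  gt_objs_center ≠ []
instance (pred_obj_center : Int × Int) (gt_objs_center : List (Int × Int)) : Decidable (Pre_match_pred_2_gt_by_obj_center pred_obj_center gt_objs_center) := by unfold Pre_match_pred_2_gt_by_obj_center; infer_instance

def pvWitness_match_pred_2_gt_by_obj_center : (Int × Int) × (List (Int × Int)) := ((3, 4), [(0, 0), (3, 5), (3, 4)])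

def Spec_match_pred_2_gt_by_obj_center (pred_obj_center : Int × Int) (gt_objs_center : List (Int × Int)) (out : Int) : Prop := out = match_pred_2_gt_by_obj_center_alt pred_obj_center gt_objs_center
instance (pred_obj_center : Int × Int) (gt_objs_center : List (Int × Int)) (out : Int) : Decidable (Spec_match_pred_2_gt_by_obj_center pred_obj_center gt_objs_center out) := by unfold Spec_match_pred_2_gt_by_obj_center; infer_instance

-- ===== CLAIM (what is proved, stated in full; the proofs are below) =====
def Claim_equal_match_pred_2_gt_by_obj_center : Prop := ∀ (pred_obj_center : Int × Int) (gt_objs_center : List (Int × Int)), Dom_match_pred_2_gt_by_obj_center pred_obj_center gt_objs_center → Pre_match_pred_2_gt_by_obj_center pred_obj_center gt_objs_center → Spec_match_pred_2_gt_by_obj_center pred_obj_center gt_objs_center (match_pred_2_gt_by_obj_center pred_obj_center gt_objs_center)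

-- ===== LEMMAS AND PROOFS =====

-- idxOf? returns some idxOf on members.
theorem pv_idxOf?_eq_some_of_mem {l : List Int} {x : Int} (h : x ∈ l) :
    List.idxOf? x l = some (List.idxOf x l) := by
  cases h' : List.idxOf? x l with
  | none => exact absurd (List.idxOf?_eq_none_iff.mp h') (by simpa using h)
  | some k => rw [List.idxOf_eq_getD_idxOf?, h']; rfl

-- The running-minimum fold only looks at the key on the accumulator and on members.
theorem pv_min?_congr_aux {α : Type} (l : List α) (k1 k2 : α → Int)
    (h : ∀ y ∈ l, k1 y = k2 y) :
    ∀ acc : Option α, (∀ a, acc = some a → k1 a = k2 a) →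
      l.foldl (fun acc x => match acc with
        | none => some x
        | some m => if k1 x < k1 m then some x else some m) acc
      = l.foldl (fun acc x => match acc with
        | none => some x
        | some m => if k2 x < k2 m then some x else some m) acc := by
  induction l with
  | nil => intro acc _; rfl
  | cons x t ih =>
    intro acc hacc
    have hx : k1 x = k2 x := h x (List.mem_cons_self ..)
    have ht : ∀ y ∈ t, k1 y = k2 y := fun y hy => h y (List.mem_cons_of_mem _ hy)
    cases acc with
    | none =>
      simp only [List.foldl_cons]
      exact ih ht (some x) (fun a ha => by cases ha; exact hx)
    | some m =>
      have hm : k1 m = k2 m := hacc m rfl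
      simp only [List.foldl_cons, hx, hm]
      by_cases hlt : k2 x < k2 m
      · simp only [if_pos hlt]
        exact ih ht (some x) (fun a ha => by cases ha; exact hx)
      · simp only [if_neg hlt]
        exact ih ht (some m) (fun a ha => by cases ha; exact hm)

-- min? only looks at the key on members of the list.
theorem pv_min?_congr {α : Type} (l : List α) (k1 k2 : α → Int)
    (h : ∀ y ∈ l, k1 y = k2 y) :
    PySem.List.min? l k1 = PySem.List.min? l k2 := by
  unfold PySem.List.min?
  exact pv_min?_congr_aux l k1 k2 h none (fun a ha => by cases ha)

theorem pv_pyRange_self (a : Int) : PySem.List.pyRange a a = [] := by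
  refine List.eq_nil_iff_forall_not_mem.mpr (fun x hx => ?_)
  have := PySem.List.mem_pyRange_one.mp hx
  omega

theorem pv_pyRange_succ (n : Nat) :
    PySem.List.pyRange 0 ((n + 1 : Nat) : Int)
      = PySem.List.pyRange 0 (n : Int) ++ [(n : Int)] := by
  rw [PySem.List.pyRange_one_append 0 (n : Int) ((n + 1 : Nat) : Int) (by positivity) (by push_cast; omega)]
  rw [PySem.List.pyRange_one_cons (a := (n : Int)) (by push_cast; omega)]
  have : ((n : Int) + 1) = ((n + 1 : Nat) : Int) := by push_cast; ring
  rw [this, pv_pyRange_self]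

-- Core invariant (A side): on a nonempty list of errors, A's min-then-index pair and
-- the sequential argmin-over-indices pass pick out the same first-minimal index.
theorem pv_core (d : Int) (errs : List Int) (hne : errs ≠ []) :
    ∃ m : Int, PySem.List.min? errs (fun x => x) = some m ∧
      PySem.List.min? (PySem.List.pyRange 0 errs.length)
          (fun i => PySem.List.pyGetD errs i d) = some ((List.idxOf m errs : Nat) : Int) := by
  induction errs using List.reverseRecOn with
  | nil => exact absurd rfl hne
  | append_singleton xs x ih =>
    by_cases hxs : xs = []
    · subst hxs
      simp only [List.nil_append]
      refine ⟨x, by simp [PySem.List.min?], ?_⟩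
      have h1 : PySem.List.pyRange 0 (([x] : List Int).length) = [(0 : Int)] := by
        simp only [List.length_singleton]
        rw [show ((1 : Nat) : Int) = ((0 + 1 : Nat) : Int) by norm_num, pv_pyRange_succ]
        simp
      rw [h1]
      simp [PySem.List.min?]
    · obtain ⟨m, hmin, hB⟩ := ih hxs
      have hmem : m ∈ xs := PySem.List.min?_mem hmin
      have hisMin : ∀ y ∈ xs, m ≤ y := by
        have := PySem.List.min?_isMin (key := fun x => x) hmin
        simpa using this
      have hidxlt : List.idxOf m xs < xs.length := List.idxOf_lt_length_of_mem hmem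
      have hA : PySem.List.min? (xs ++ [x]) (fun y => y)
          = if x < m then some x else some m := by
        unfold PySem.List.min? at hmin ⊢
        rw [List.foldl_append, hmin]
        rfl
      have hkeys : ∀ i ∈ PySem.List.pyRange 0 (xs.length : Int),
          PySem.List.pyGetD (xs ++ [x]) i d = PySem.List.pyGetD xs i d := by
        intro i hi
        have hib := PySem.List.mem_pyRange_one.mp hi
        have h1 : i < ((xs ++ [x]).length : Int) := by simp; omega
        rw [PySem.List.pyGetD_eq_getElem _ d hib.1 h1,
            PySem.List.pyGetD_eq_getElem _ d hib.1 (by omega)]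
        exact List.getElem_append_left (by omega)
      have hBold : PySem.List.min? (PySem.List.pyRange 0 (xs.length : Int))
          (fun i => PySem.List.pyGetD (xs ++ [x]) i d)
          = some ((List.idxOf m xs : Nat) : Int) := by
        rw [pv_min?_congr _ _ _ hkeys]; exact hB
      have hkeyn : PySem.List.pyGetD (xs ++ [x]) (xs.length : Int) d = x := by
        rw [PySem.List.pyGetD_eq_getElem _ d (by positivity) (by simp)]
        simp
      have hkeyidx : PySem.List.pyGetD (xs ++ [x]) ((List.idxOf m xs : Nat) : Int) d = m := by
        rw [PySem.List.pyGetD_eq_getElem _ d (by positivity) (by simp; omega)]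
        simp only [Int.toNat_natCast]
        exact (List.getElem_append_left (by omega)).trans (List.getElem_idxOf hidxlt)
      have hBstep : PySem.List.min? (PySem.List.pyRange 0 ((xs ++ [x]).length : Int))
          (fun i => PySem.List.pyGetD (xs ++ [x]) i d)
          = if x < m then some ((xs.length : Nat) : Int) else some ((List.idxOf m xs : Nat) : Int) := by
        have hlen : ((xs ++ [x]).length : Int) = ((xs.length + 1 : Nat) : Int) := by simp
        rw [hlen, pv_pyRange_succ]
        unfold PySem.List.min? at hBold ⊢
        rw [List.foldl_append, hBold]
        simp only [List.foldl_cons, List.foldl_nil, hkeyn, hkeyidx]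
      by_cases hxm : x < m
      · refine ⟨x, by rw [hA, if_pos hxm], ?_⟩
        have hnotmem : x ∉ xs := fun hx => absurd hxm (by have := hisMin x hx; omega)
        rw [hBstep, if_pos hxm]
        rw [List.idxOf_append, if_neg hnotmem]
        simp
      · refine ⟨m, by rw [hA, if_neg hxm], ?_⟩
        rw [hBstep, if_neg hxm]
        rw [List.idxOf_append, if_pos hmem]

-- Sequential left-to-right running best (proof-side model of a linear pass).
def pvRun (k : Int → Int) (acc : Int × Int) (l : List Int) : Int × Int :=
  l.foldl (fun b i => if k i < b.2 then (i, k i) else b) acc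

-- Absorption: running a segment started from its own head, then comparing with the
-- incoming accumulator (acc wins ties), equals running the segment from acc.
theorem pvRun_absorb (k : Int → Int) :
    ∀ (l : List Int) (i : Int) (acc : Int × Int),
      pvRun k acc (i :: l)
        = if (pvRun k (i, k i) l).2 < acc.2 then pvRun k (i, k i) l else acc := by
  intro l
  induction l with
  | nil =>
    intro i acc
    simp only [pvRun, List.foldl_cons, List.foldl_nil]
  | cons j t ih =>
    intro i acc
    have hL : pvRun k acc (i :: j :: t)
        = pvRun k (if k i < acc.2 then (i, k i) else acc) (j :: t) := by
      simp only [pvRun, List.foldl_cons]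
    rw [hL, ih j, ih j]
    by_cases h1 : k i < acc.2 <;> by_cases h2 : (pvRun k (j, k j) t).2 < k i <;>
      simp only [h1, h2, if_pos, if_false] <;> split_ifs <;>
      first | rfl | omega

-- min over a nonempty list as a running fold from the head.
theorem pv_min?_cons (k : Int → Int) (a : Int) (l : List Int) :
    PySem.List.min? (a :: l) k
      = some (l.foldl (fun m x => if k x < k m then x else m) a) := by
  unfold PySem.List.min?
  simp only [List.foldl_cons]
  induction l generalizing a with
  | nil => rfl
  | cons x t ih =>
    simp only [List.foldl_cons]
    by_cases h : k x < k a <;> simp only [h, if_false, if_pos] <;> exact ih _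

-- The pair-carrying run computes exactly min?'s running fold in its first component.
theorem pvRun_fst (k : Int → Int) :
    ∀ (l : List Int) (a : Int),
      pvRun k (a, k a) l
        = (l.foldl (fun m x => if k x < k m then x else m) a,
           k (l.foldl (fun m x => if k x < k m then x else m) a)) := by
  intro l
  induction l with
  | nil => intro a; rfl
  | cons x t ih =>
    intro a
    simp only [pvRun, List.foldl_cons] at *
    by_cases h : k x < k a <;> simp only [h, if_false, if_pos] <;> exact ih _

-- The divide-and-conquer tournament equals the sequential run over its index range.
theorem pvBest_eq_run (p : Int × Int) (gt : List (Int × Int)) :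
    ∀ (n : Nat) (lo hi : Int), (hi - lo).toNat ≤ n → lo < hi →
      pvBest p gt lo hi
        = pvRun (pvErr p gt) (lo, pvErr p gt lo) (PySem.List.pyRange (lo + 1) hi) := by
  intro n
  induction n with
  | zero => intro lo hi hle hlt; omega
  | succ n ih =>
    intro lo hi hle hlt
    rw [pvBest]
    by_cases hg : hi - lo ≤ 1
    · have : hi = lo + 1 := by omega
      subst this
      rw [pv_pyRange_self]
      simp [pvRun]
    · simp only [dif_neg hg]
      have hlo : lo + 1 ≤ PySem.Int.floordiv (lo + hi) 2 :=
        (PySem.Int.le_floordiv_iff_mul_le (by omega)).mpr (by omega)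
      have hhi : PySem.Int.floordiv (lo + hi) 2 < hi :=
        (PySem.Int.floordiv_lt_iff_lt_mul (by omega)).mpr (by omega)
      generalize hmid : PySem.Int.floordiv (lo + hi) 2 = mid at hlo hhi ⊢
      have hL := ih lo mid (by omega) (by omega)
      have hR := ih mid hi (by omega) (by omega)
      rw [hL, hR]
      have hsplit : PySem.List.pyRange (lo + 1) hi
          = PySem.List.pyRange (lo + 1) mid ++ (mid :: PySem.List.pyRange (mid + 1) hi) := by
        rw [PySem.List.pyRange_one_append (lo + 1) mid hi (by omega) (by omega),
            PySem.List.pyRange_one_cons (a := mid) (b := hi) (by omega)]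
      rw [hsplit]
      have happ : pvRun (pvErr p gt) (lo, pvErr p gt lo)
            (PySem.List.pyRange (lo + 1) mid ++ (mid :: PySem.List.pyRange (mid + 1) hi))
          = pvRun (pvErr p gt)
              (pvRun (pvErr p gt) (lo, pvErr p gt lo) (PySem.List.pyRange (lo + 1) mid))
              (mid :: PySem.List.pyRange (mid + 1) hi) := by
        simp only [pvRun, List.foldl_append]
      rw [happ, pvRun_absorb]
      set L := pvRun (pvErr p gt) (lo, pvErr p gt lo) (PySem.List.pyRange (lo + 1) mid)
      set R := pvRun (pvErr p gt) (mid, pvErr p gt mid) (PySem.List.pyRange (mid + 1) hi)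
      by_cases hc : L.2 ≤ R.2
      · rw [if_pos hc, if_neg (by omega)]
      · rw [if_neg hc, if_pos (by omega)]

-- ===== VERDICT (by name: the statement is the Claim_ definition above) =====
theorem match_pred_2_gt_by_obj_center_spec : Claim_equal_match_pred_2_gt_by_obj_center := by
  intro p gt _ hpre
  unfold Spec_match_pred_2_gt_by_obj_center
  unfold match_pred_2_gt_by_obj_center match_pred_2_gt_by_obj_center_alt
  rw [if_neg (by simpa [List.isEmpty_iff] using hpre)]
  simp only [PySem.List.foldl_append_singleton_eq_map
    (f := fun g : Int × Int => (p.1 - g.1) ^ 2 + (p.2 - g.2) ^ 2), List.nil_append]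
  obtain ⟨m, hmin, hB⟩ := pv_core
    ((fun g : Int × Int => (p.1 - g.1) ^ 2 + (p.2 - g.2) ^ 2) ((0 : Int), (0 : Int)))
    (gt.map (fun g : Int × Int => (p.1 - g.1) ^ 2 + (p.2 - g.2) ^ 2))
    (by simpa using hpre)
  rw [hmin]
  -- the index key over the mapped error list is exactly pvErr over gt
  have hkey : (fun i => PySem.List.pyGetD
        (gt.map (fun g : Int × Int => (p.1 - g.1) ^ 2 + (p.2 - g.2) ^ 2)) i
        ((fun g : Int × Int => (p.1 - g.1) ^ 2 + (p.2 - g.2) ^ 2) ((0 : Int), (0 : Int))))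
      = pvErr p gt :=
    funext fun i => by
      simpa [pvErr] using (PySem.List.pyGetD_map
        (fun g : Int × Int => (p.1 - g.1) ^ 2 + (p.2 - g.2) ^ 2) gt i ((0 : Int), (0 : Int)))
  have hlen : (gt.map (fun g : Int × Int => (p.1 - g.1) ^ 2 + (p.2 - g.2) ^ 2)).length
      = gt.length := List.length_map ..
  rw [hlen, hkey] at hB
  -- evaluate B's side: tournament = sequential run = min? over the index range
  have hlt : (0 : Int) < (gt.length : Int) := by
    have : gt ≠ [] := hpre
    cases gt with
    | nil => exact absurd rfl this
    | cons a l => simp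
  rw [pvBest_eq_run p gt ((gt.length : Int) - 0).toNat 0 (gt.length : Int) le_rfl hlt]
  have hcons : PySem.List.pyRange 0 (gt.length : Int)
      = (0 : Int) :: PySem.List.pyRange (0 + 1) (gt.length : Int) := by
    simpa using PySem.List.pyRange_one_cons (a := (0 : Int)) (b := (gt.length : Int)) hlt
  rw [hcons, pv_min?_cons] at hB
  rw [pvRun_fst (pvErr p gt) (PySem.List.pyRange (0 + 1) (gt.length : Int)) 0]
  have hval : (PySem.List.pyRange (0 + 1) (gt.length : Int)).foldl
      (fun m x => if pvErr p gt x < pvErr p gt m then x else m) 0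
      = ((List.idxOf m (gt.map (fun g : Int × Int => (p.1 - g.1) ^ 2 + (p.2 - g.2) ^ 2)) : Nat) : Int) := by
    exact Option.some.inj hB
  rw [hval]
  show ((PySem.List.index? _ m).getD 0 : Int) = _
  rw [PySem.List.index?_eq_idxOf?, pv_idxOf?_eq_some_of_mem (PySem.List.min?_mem hmin)]
  rfl
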